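-- pv_equiv track=rewrite | github.com/tugyanalper/OSSPPy | OSSP_GA_OOP.py | check_overlap_othmach
-- ===== SOURCE A (Python) =====
-- def check_overlap_othmach(time_interval_list, proc_time, current_machine_available_time):
--     if len(time_interval_list) != 0:
--         for s_time, c_time in time_interval_list:
--             range_set = set(range(current_machine_available_time,
--                                   current_machine_available_time + proc_time + 1))
--             overlap = range_set.intersection(set(range(s_time, c_time)))
--             if overlap:
--                 current_machine_available_time = c_time
--
--         time_to_schedule = current_machine_available_time
--     else:
--         time_to_schedule = current_machine_available_time
--
--     return time_to_schedule
-- ===== SOURCE B (Python) =====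
-- def check_overlap_othmach(time_interval_list, proc_time, current_machine_available_time):
--     # Repeatedly advance a shared iterator to the NEXT interval that conflicts with the
--     # window [cat, cat+proc_time] and jump cat past it; non-conflicting intervals never
--     # change cat, so skipping them wholesale is exact.  No integer sets are built.
--     cat = current_machine_available_time
--     it = iter(time_interval_list)
--     while True:
--         hit = next(((s, c) for s, c in it
--                     if proc_time >= 0 and s <= cat + proc_time and cat < c and s < c),
--                    None)
--         if hit is None:
--             return cat
--         cat = hit[1]
-- ===== Notes on version B (the rewrite author's own statement) =====
-- stated objective: faster
-- what changed: instead of testing every interval by materialising set(range(cat,cat+proc+1)) & set(range(s,c)), B repeatedly advances a shared iterator to the next interval whose bounds satisfy the arithmetic conflict test (proc>=0 and s<=cat+proc and cat<c and s<c) and jumps cat past it, skipping non-conflicting intervals without any state update and building no sets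
import Mathlib
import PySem

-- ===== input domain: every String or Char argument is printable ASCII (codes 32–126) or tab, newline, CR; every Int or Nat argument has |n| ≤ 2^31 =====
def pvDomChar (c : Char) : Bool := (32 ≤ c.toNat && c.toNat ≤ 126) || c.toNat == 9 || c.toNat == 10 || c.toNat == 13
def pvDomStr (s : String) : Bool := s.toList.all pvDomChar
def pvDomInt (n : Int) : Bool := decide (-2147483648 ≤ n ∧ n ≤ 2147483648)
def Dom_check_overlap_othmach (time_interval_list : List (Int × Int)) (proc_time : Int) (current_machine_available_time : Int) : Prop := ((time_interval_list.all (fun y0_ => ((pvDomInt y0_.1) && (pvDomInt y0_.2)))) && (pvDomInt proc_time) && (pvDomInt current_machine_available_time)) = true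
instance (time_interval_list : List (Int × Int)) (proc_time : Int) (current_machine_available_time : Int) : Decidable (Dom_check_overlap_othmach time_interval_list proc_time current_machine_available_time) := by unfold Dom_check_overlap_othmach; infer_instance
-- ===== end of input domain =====

-- B replaces A's per-interval set(range)∩set(range) scan by a "jump past the next
-- arithmetically conflicting interval" loop over a shared iterator; objective: faster.

-- ===== PORT A =====
-- A builds set(range(cat, cat+proc+1)) & set(range(s, c)) for each interval and advances cat to c on overlap.
def pvA_loop (l : List (Int × Int)) (proc_time : Int) (cat : Int) : Int :=
  match l with
  | [] => cat
  | (s_time, c_time) :: rest =>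
    -- set(range(a, b)) is the range's elements, already distinct (nodup_pyRange_one),
    -- so it is that list as a PySem.Set; likewise set(range(s, c)) below.
    let range_set : PySem.Set Int :=
      PySem.List.pyRange cat (cat + proc_time + 1) 1
    let overlap : PySem.Set Int :=
      PySem.Set.inter range_set (PySem.List.pyRange s_time c_time 1)
    pvA_loop rest proc_time (if overlap ≠ [] then c_time else cat)

def check_overlap_othmach (time_interval_list : List (Int × Int)) (proc_time : Int) (current_machine_available_time : Int) : Int :=
  if time_interval_list.length ≠ 0 then
    pvA_loop time_interval_list proc_time current_machine_available_time
  else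
    current_machine_available_time

-- ===== PORT B =====
-- the arithmetic conflict predicate of B's generator filter
def pvB_hit (proc_time cat : Int) (p : Int × Int) : Bool :=
  decide (0 ≤ proc_time ∧ p.1 ≤ cat + proc_time ∧ cat < p.2 ∧ p.1 < p.2)

-- B's while-loop: the shared iterator is the remaining list; 'next(…, None)' is
-- findIdx? of the first conflict, and consuming through it is 'drop (i+1)'.
def pvB_loop (rest : List (Int × Int)) (proc_time : Int) (cat : Int) : Int :=
  match h : rest.findIdx? (pvB_hit proc_time cat) with
  | none => cat
  | some i => pvB_loop (rest.drop (i + 1)) proc_time ((rest.getD i (0, 0)).2)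
termination_by rest.length
decreasing_by
  obtain ⟨hi, -⟩ := List.findIdx?_eq_some_iff_getElem.mp h
  simp [List.length_drop]; omega

def check_overlap_othmach_alt (time_interval_list : List (Int × Int)) (proc_time : Int) (current_machine_available_time : Int) : Int :=
  pvB_loop time_interval_list proc_time current_machine_available_time

-- ===== PRECONDITION & SPEC =====
def Spec_check_overlap_othmach (time_interval_list : List (Int × Int)) (proc_time : Int) (current_machine_available_time : Int) (out : Int) : Prop := out = check_overlap_othmach_alt time_interval_list proc_time current_machine_available_time
instance (time_interval_list : List (Int × Int)) (proc_time : Int) (current_machine_available_time : Int) (out : Int) : Decidable (Spec_check_overlap_othmach time_interval_list proc_time current_machine_available_time out) := by unfold Spec_check_overlap_othmach; infer_instance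

-- ===== CLAIM (what is proved, stated in full; the proofs are below) =====
def Claim_equal_check_overlap_othmach : Prop := ∀ (time_interval_list : List (Int × Int)) (proc_time : Int) (current_machine_available_time : Int), Dom_check_overlap_othmach time_interval_list proc_time current_machine_available_time → Spec_check_overlap_othmach time_interval_list proc_time current_machine_available_time (check_overlap_othmach time_interval_list proc_time current_machine_available_time)

-- ===== LEMMAS AND PROOFS =====

-- A's set-intersection overlap test equals B's arithmetic conflict predicate
lemma pv_overlap_iff (cat proc : Int) (p : Int × Int) :
    (PySem.Set.inter (PySem.List.pyRange cat (cat + proc + 1) 1)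
      (PySem.List.pyRange p.1 p.2 1) ≠ []) ↔ pvB_hit proc cat p = true := by
  rw [← List.isEmpty_eq_false_iff, List.isEmpty_eq_false_iff_exists_mem]
  unfold pvB_hit
  rw [decide_eq_true_iff]
  constructor
  · rintro ⟨x, hx⟩
    rw [PySem.Set.mem_inter, PySem.List.mem_pyRange_one,
      PySem.List.mem_pyRange_one] at hx
    omega
  · intro h
    exact ⟨max cat p.1, by
      rw [PySem.Set.mem_inter, PySem.List.mem_pyRange_one,
        PySem.List.mem_pyRange_one]; omega⟩

lemma pvA_loop_cons (s c : Int) (tl : List (Int × Int)) (proc cat : Int) :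
    pvA_loop ((s, c) :: tl) proc cat =
      pvA_loop tl proc (if pvB_hit proc cat (s, c) then c else cat) := by
  rw [pvA_loop]
  by_cases h : pvB_hit proc cat (s, c) = true
  · rw [if_pos ((pv_overlap_iff cat proc (s, c)).mpr h), if_pos h]
  · rw [if_neg (fun hne => h ((pv_overlap_iff cat proc (s, c)).mp hne)),
      if_neg h]

lemma pvB_loop_none (rest : List (Int × Int)) (proc cat : Int)
    (h : rest.findIdx? (pvB_hit proc cat) = none) :
    pvB_loop rest proc cat = cat := by
  rw [pvB_loop]
  split
  · rfl
  · next i h' => rw [h] at h'; exact absurd h' (by simp)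

lemma pvB_loop_some (rest : List (Int × Int)) (proc cat : Int) (i : Nat)
    (h : rest.findIdx? (pvB_hit proc cat) = some i) :
    pvB_loop rest proc cat = pvB_loop (rest.drop (i + 1)) proc ((rest.getD i (0, 0)).2) := by
  rw [pvB_loop]
  split
  · next h' => rw [h] at h'; exact absurd h' (by simp)
  · next j h' => rw [h] at h'; cases h'; rfl

lemma pvB_loop_cons_hit (s c : Int) (tl : List (Int × Int)) (proc cat : Int)
    (h : pvB_hit proc cat (s, c) = true) :
    pvB_loop ((s, c) :: tl) proc cat = pvB_loop tl proc c := by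
  rw [pvB_loop_some ((s, c) :: tl) proc cat 0 (by simp [List.findIdx?_cons, h])]
  rfl

lemma pvB_loop_cons_miss (s c : Int) (tl : List (Int × Int)) (proc cat : Int)
    (h : pvB_hit proc cat (s, c) = false) :
    pvB_loop ((s, c) :: tl) proc cat = pvB_loop tl proc cat := by
  cases hfi : tl.findIdx? (pvB_hit proc cat) with
  | none =>
    rw [pvB_loop_none ((s, c) :: tl) proc cat (by simp [List.findIdx?_cons, h, hfi]),
      pvB_loop_none tl proc cat hfi]
  | some i =>
    rw [pvB_loop_some ((s, c) :: tl) proc cat (i + 1)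
        (by simp [List.findIdx?_cons, h, hfi]),
      pvB_loop_some tl proc cat i hfi]
    rfl

lemma pvB_loop_eq_pvA_loop (l : List (Int × Int)) (proc cat : Int) :
    pvB_loop l proc cat = pvA_loop l proc cat := by
  induction l generalizing cat with
  | nil => rw [pvB_loop_none [] proc cat rfl]; rfl
  | cons hd tl ih =>
    obtain ⟨s, c⟩ := hd
    rw [pvA_loop_cons]
    by_cases h : pvB_hit proc cat (s, c) = true
    · rw [pvB_loop_cons_hit s c tl proc cat h, if_pos h, ih]
    · rw [pvB_loop_cons_miss s c tl proc cat (by simpa using h), if_neg h, ih]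

-- ===== VERDICT (by name: the statement is the Claim_ definition above) =====
theorem check_overlap_othmach_spec : Claim_equal_check_overlap_othmach := by
  intro l proc cat _
  unfold Spec_check_overlap_othmach check_overlap_othmach check_overlap_othmach_alt
  rcases l with _ | ⟨hd, tl⟩
  · rw [if_neg (by simp), pvB_loop_none [] proc cat rfl]
  · rw [if_pos (by simp), pvB_loop_eq_pvA_loop]
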